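-- pv_equiv track=rewrite | github.com/twotwobread/Today-I-Learn | codingTest/프로그래머스/모의고사.py | solution
-- ===== SOURCE A (Python) =====
-- def solution(answers):
--     a=1
--     answer = []
--     # 1번 12345 5개
--     # 2번 21232425 8개
--     # 3번 3311224455 10개
--
--     num_1 = [1,2,3,4,5]
--     num_2 = [2,1,2,3,2,4,2,5]
--     num_3 = [3,3,1,1,2,2,4,4,5,5]
--     count_1 = 0; count_2 = 0; count_3 = 0
--     for idx in range(len(answers)):
--         if num_1[idx % len(num_1)] == answers[idx]:
--             count_1+=1
--         if num_2[idx % len(num_2)] == answers[idx]: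
--             count_2+=1
--         if num_3[idx % len(num_3)] == answers[idx]:
--             count_3+=1
--
--     if count_1 == count_2:
--         if count_1 < count_3:
--             answer.append(3)
--         elif count_1 == count_3:
--             answer.append(1); answer.append(2); answer.append(3)
--         else:
--             answer.append(1); answer.append(2)
--     elif count_1 > count_2:
--         if count_1 < count_3:
--             answer.append(3)
--         elif count_1 == count_3:
--             answer.append(1); answer.append(3)
--         else:
--             answer.append(1)
--     elif count_1 < count_2:
--         if count_2 < count_3:
--             answer.append(3)
--         elif count_2 == count_3:
--             answer.append(2); answer.append(3)
--         else:
--             answer.append(2)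
--
--     return answer
-- ===== SOURCE B (Python) =====
-- def solution(answers):
--     patterns = [[1, 2, 3, 4, 5],
--                 [2, 1, 2, 3, 2, 4, 2, 5],
--                 [3, 3, 1, 1, 2, 2, 4, 4, 5, 5]]
--     scores = [sum(1 if p[i % len(p)] == a else 0 for i, a in enumerate(answers))
--               for p in patterns]
--     best = max(scores)
--     return [n for n, s in enumerate(scores, 1) if s == best]
-- ===== Notes on version B (the rewrite author's own statement) =====
-- stated objective: simpler
-- what changed: Replaces the nine-branch nested tie-decision tree with max-then-filter over a list of per-pattern scores computed by a single comprehension over enumerate.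
import Mathlib
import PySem

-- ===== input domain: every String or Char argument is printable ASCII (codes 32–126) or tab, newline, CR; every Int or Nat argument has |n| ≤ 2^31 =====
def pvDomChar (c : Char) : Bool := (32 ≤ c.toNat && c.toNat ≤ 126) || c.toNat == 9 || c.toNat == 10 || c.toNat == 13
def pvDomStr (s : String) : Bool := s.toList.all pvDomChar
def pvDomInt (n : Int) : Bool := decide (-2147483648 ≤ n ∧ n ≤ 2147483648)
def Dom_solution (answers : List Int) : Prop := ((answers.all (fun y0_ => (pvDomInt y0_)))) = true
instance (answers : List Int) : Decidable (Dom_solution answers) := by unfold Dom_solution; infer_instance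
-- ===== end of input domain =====

-- B replaces A's nine-branch nested tie-decision tree by max-then-filter over a list of
-- per-pattern scores (objective: simpler).

-- ===== PORT A =====
def solution (answers : List Int) : List Int :=
  let num_1 : List Int := [1, 2, 3, 4, 5]
  let num_2 : List Int := [2, 1, 2, 3, 2, 4, 2, 5]
  let num_3 : List Int := [3, 3, 1, 1, 2, 2, 4, 4, 5, 5]
  let c := (PySem.List.pyRange 0 (answers.length : Int) 1).foldl
    (fun (c : Int × Int × Int) idx =>
      let c1 := if PySem.List.pyGetD num_1 (PySem.Int.mod idx (num_1.length : Int)) 0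
                   = PySem.List.pyGetD answers idx 0 then c.1 + 1 else c.1
      let c2 := if PySem.List.pyGetD num_2 (PySem.Int.mod idx (num_2.length : Int)) 0
                   = PySem.List.pyGetD answers idx 0 then c.2.1 + 1 else c.2.1
      let c3 := if PySem.List.pyGetD num_3 (PySem.Int.mod idx (num_3.length : Int)) 0
                   = PySem.List.pyGetD answers idx 0 then c.2.2 + 1 else c.2.2
      (c1, c2, c3)) ((0 : Int), (0 : Int), (0 : Int))
  if c.1 = c.2.1 then
    if c.1 < c.2.2 then [3]
    else if c.1 = c.2.2 then [1, 2, 3]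
    else [1, 2]
  else if c.1 > c.2.1 then
    if c.1 < c.2.2 then [3]
    else if c.1 = c.2.2 then [1, 3]
    else [1]
  else if c.1 < c.2.1 then
    if c.2.1 < c.2.2 then [3]
    else if c.2.1 = c.2.2 then [2, 3]
    else [2]
  else []

-- ===== PORT B =====
def altScore (p : List Int) (answers : List Int) : Int :=
  ((PySem.List.enumerate answers 0).map
    (fun ia => if PySem.List.pyGetD p (PySem.Int.mod ia.1 (p.length : Int)) 0 = ia.2
               then (1 : Int) else 0)).sum

def solution_alt (answers : List Int) : List Int :=
  let patterns : List (List Int) :=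
    [[1, 2, 3, 4, 5], [2, 1, 2, 3, 2, 4, 2, 5], [3, 3, 1, 1, 2, 2, 4, 4, 5, 5]]
  let scores := patterns.map (fun p => altScore p answers)
  let best := (PySem.List.max? scores (fun x => x)).getD 0
  (PySem.List.enumerate scores 1).filterMap
    (fun ns => if ns.2 = best then some ns.1 else none)

-- ===== PRECONDITION & SPEC =====
def Spec_solution (answers : List Int) (out : List Int) : Prop := out = solution_alt answers
instance (answers : List Int) (out : List Int) : Decidable (Spec_solution answers out) := by unfold Spec_solution; infer_instance

-- ===== CLAIM (what is proved, stated in full; the proofs are below) =====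
def Claim_equal_solution : Prop := ∀ (answers : List Int), Dom_solution answers → Spec_solution answers (solution answers)

-- ===== LEMMAS AND PROOFS =====

-- counting 'if p: c += 1' in additive form
theorem ite_succ_eq_add (p : Prop) [Decidable p] (a : Int) :
    (if p then a + 1 else a) = a + (if p then (1 : Int) else 0) := by
  split_ifs <;> ring

-- splitting A's triple-accumulator fold into three independent 0/1-sums
theorem foldl_triple (l : List Int) (F G H : Int → Int) (a b c : Int) :
    l.foldl (fun acc i => (acc.1 + F i, acc.2.1 + G i, acc.2.2 + H i)) (a, b, c)
      = (a + (l.map F).sum, b + (l.map G).sum, c + (l.map H).sum) := by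
  induction l generalizing a b c with
  | nil => simp
  | cons x t ih =>
    simp only [List.foldl_cons, List.map_cons, List.sum_cons, ih]
    refine Prod.ext ?_ (Prod.ext ?_ ?_) <;> simp <;> ring

-- A's decision tree and B's max-then-filter agree as functions of the three counts
theorem tree_eq_pick (a b c : Int) :
    (if a = b then
      if a < c then [3] else if a = c then [1, 2, 3] else [1, 2]
    else if a > b then
      if a < c then [3] else if a = c then [1, 3] else [1]
    else if a < b then
      if b < c then [3] else if b = c then [2, 3] else [2]
    else ([] : List Int))
    = (PySem.List.enumerate [a, b, c] 1).filterMap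
        (fun ns => if ns.2 = (PySem.List.max? [a, b, c] (fun x => x)).getD 0
                   then some ns.1 else none) := by
  rw [PySem.List.max?_id_cons]
  simp only [PySem.List.enumerate_cons, PySem.List.enumerate_nil, List.filterMap_cons,
    List.filterMap_nil, List.foldl_cons, List.foldl_nil, Option.getD_some, max_def]
  split_ifs <;> first | rfl | omega

-- ===== VERDICT (by name: the statement is the Claim_ definition above) =====
theorem solution_spec : Claim_equal_solution := by
  intro answers _
  unfold Spec_solution solution solution_alt altScore
  rw [PySem.List.enumerate_eq_map_pyRange (d := 0)]
  simp only [List.map_cons, List.map_nil, List.map_map,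
    List.length_cons, List.length_nil, Nat.reduceAdd, PySem.List.len_eq]
  simp only [ite_succ_eq_add]
  rw [foldl_triple]
  simp only [zero_add]
  exact tree_eq_pick _ _ _
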